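-- pv_equiv track=rewrite | github.com/calvinp0/chemprop_dmat | scripts/ts_pipeline.py | _parse_sdf_props_block
-- ===== SOURCE A (Python) =====
-- def _parse_sdf_props_block(block: str) -> dict:
--     props: dict[str, str] = {}
--     lines = block.splitlines()
--     i = 0
--     n = len(lines)
--     while i < n:
--         line = lines[i]
--         if line.startswith(">") and "<" in line and ">" in line:
--             key = line.split("<", 1)[1].split(">", 1)[0].strip().lower()
--             i += 1
--             values = []
--             while i < n and lines[i].strip() != "":
--                 values.append(lines[i].rstrip())
--                 i += 1
--             props[key] = "\n".join(values).strip()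
--         else:
--             i += 1
--     return props
-- ===== SOURCE B (Python) =====
-- def _parse_sdf_props_block(block: str) -> dict:
--     props: dict[str, str] = {}
--     # partition into maximal runs of non-blank lines
--     groups = []
--     cur = []
--     for line in block.splitlines():
--         if line.strip() == "":
--             if cur:
--                 groups.append(cur)
--                 cur = []
--         else:
--             cur.append(line)
--     if cur:
--         groups.append(cur)
--     for group in groups:
--         # first header line of the run opens the property; the rest is its value
--         j = 0
--         while j < len(group) and not (group[j].startswith(">") and "<" in group[j]):
--             j += 1
--         if j < len(group):
--             key = group[j].split("<", 1)[1].split(">", 1)[0].strip().lower()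
--             props[key] = "\n".join(l.rstrip() for l in group[j + 1:]).strip()
--     return props
-- ===== Notes on version B (the rewrite author's own statement) =====
-- stated objective: alternative
-- what changed: Replaces A's single index-driven while loop (manual cursor with a nested value-consuming inner while) by a two-phase decomposition: first partition the lines into maximal non-blank runs, then process each run independently by locating its first header line and taking the remainder of the run as the value.
import Mathlib
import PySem

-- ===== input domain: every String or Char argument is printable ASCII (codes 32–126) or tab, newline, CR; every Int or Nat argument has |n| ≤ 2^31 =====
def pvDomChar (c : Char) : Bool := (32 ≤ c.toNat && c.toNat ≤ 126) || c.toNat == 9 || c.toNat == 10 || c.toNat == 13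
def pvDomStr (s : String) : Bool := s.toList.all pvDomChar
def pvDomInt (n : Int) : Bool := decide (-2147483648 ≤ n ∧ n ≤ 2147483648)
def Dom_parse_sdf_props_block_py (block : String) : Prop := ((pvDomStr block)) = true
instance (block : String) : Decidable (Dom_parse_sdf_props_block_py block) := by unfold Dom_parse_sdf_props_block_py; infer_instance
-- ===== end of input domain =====

-- B replaces A's single index-driven scan by a two-phase decomposition (partition into
-- non-blank runs, then handle each run); same cost, no speed claim.

-- ===== PORT A =====
-- line.strip() == ""
def pvBlank (l : String) : Bool := PySem.Str.strip l == ""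

-- line.startswith(">") and "<" in line and ">" in line
def pvHeaderA (l : String) : Bool :=
  PySem.Str.startswith l ">" && PySem.Str.isIn "<" l && PySem.Str.isIn ">" l

-- line.split("<", 1)[1].split(">", 1)[0].strip().lower()
-- (the [1]/[0] indexings are guarded by the caller's header test, so the getD defaults are never used)
def pvKeyOf (l : String) : String :=
  PySem.Str.lower (PySem.Str.strip
    (((PySem.Str.splitMax? (((PySem.Str.splitMax? l "<" 1).getD []).getD 1 "") ">" 1).getD []).getD 0 ""))

-- A's outer while loop over the line cursor; the inner value-collecting while is the
-- takeWhile/dropWhile split of the remaining lines at the first blank line.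
def pvLoopA : List String → PySem.Dict String String → PySem.Dict String String
  | [], d => d
  | line :: rest, d =>
    if pvHeaderA line then
      pvLoopA (rest.dropWhile (fun l => !pvBlank l))
        (d.insert (pvKeyOf line)
          (PySem.Str.strip (PySem.Str.join "\n"
            ((rest.takeWhile (fun l => !pvBlank l)).map PySem.Str.rstrip))))
    else pvLoopA rest d
  termination_by l _ => l.length
  decreasing_by
  all_goals first
    | exact Nat.lt_succ_of_le (List.length_dropWhile_le _ _)
    | simp

def parse_sdf_props_block_py (block : String) : List (String × String) :=
  (pvLoopA (PySem.Str.splitlines block) PySem.Dict.empty).items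

-- ===== PORT B =====
-- B's header test (the redundant '">" in line' conjunct dropped)
def pvHeaderB (l : String) : Bool := PySem.Str.startswith l ">" && PySem.Str.isIn "<" l

-- phase 1 loop body: accumulate the current non-blank run, flush it on a blank line
def pvGStep (acc : List (List String) × List String) (line : String) :
    List (List String) × List String :=
  if pvBlank line then
    if acc.2.isEmpty then acc else (acc.1 ++ [acc.2], [])
  else (acc.1, acc.2 ++ [line])

-- phase 2 body: skip to the run's first header line; the rest of the run is the value
def pvStepB (d : PySem.Dict String String) (group : List String) :
    PySem.Dict String String :=
  match group.dropWhile (fun l => !pvHeaderB l) with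
  | [] => d
  | h :: tl =>
      d.insert (pvKeyOf h)
        (PySem.Str.strip (PySem.Str.join "\n" (tl.map PySem.Str.rstrip)))

-- final flush of the pending run (python's trailing 'if cur: groups.append(cur)')
def pvFlush (p : List (List String) × List String) : List (List String) :=
  if p.2.isEmpty then p.1 else p.1 ++ [p.2]

def parse_sdf_props_block_py_alt (block : String) : List (String × String) :=
  ((pvFlush ((PySem.Str.splitlines block).foldl pvGStep ([], []))).foldl pvStepB
    PySem.Dict.empty).items

-- ===== PRECONDITION & SPEC =====
def Spec_parse_sdf_props_block_py (block : String) (out : List (String × String)) : Prop := out = parse_sdf_props_block_py_alt block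
instance (block : String) (out : List (String × String)) : Decidable (Spec_parse_sdf_props_block_py block out) := by unfold Spec_parse_sdf_props_block_py; infer_instance

-- ===== CLAIM (what is proved, stated in full; the proofs are below) =====
def Claim_equal_parse_sdf_props_block_py : Prop := ∀ (block : String), Dom_parse_sdf_props_block_py block → Spec_parse_sdf_props_block_py block (parse_sdf_props_block_py block)

-- ===== LEMMAS AND PROOFS =====

-- recursive characterisation of B's phase-1 grouping
def pvGroupsRec : List String → List (List String)
  | [] => []
  | l :: ls =>
    if pvBlank l then pvGroupsRec ls
    else (l :: ls.takeWhile (fun x => !pvBlank x)) :: pvGroupsRec (ls.dropWhile (fun x => !pvBlank x))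
  termination_by l => l.length
  decreasing_by
  all_goals first
    | exact Nat.lt_succ_of_le (List.length_dropWhile_le _ _)
    | simp

-- pvPrep cur lines = the groups still to be produced, with pending run cur
def pvPrep : List String → List String → List (List String)
  | cur, [] => if cur.isEmpty then [] else [cur]
  | cur, l :: ls =>
    if pvBlank l then (if cur.isEmpty then [] else [cur]) ++ pvPrep [] ls
    else pvPrep (cur ++ [l]) ls

lemma pvGStep_foldl (lines : List String) : ∀ (gs : List (List String)) (cur : List String),
    pvFlush (lines.foldl pvGStep (gs, cur)) = gs ++ pvPrep cur lines := by
  induction lines with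
  | nil =>
    intro gs cur
    simp only [List.foldl_nil, pvPrep, pvFlush]
    by_cases h : cur.isEmpty <;> simp [h]
  | cons l ls ih =>
    intro gs cur
    simp only [List.foldl_cons]
    by_cases hb : pvBlank l
    · by_cases hc : cur.isEmpty
      · rw [show pvGStep (gs, cur) l = (gs, cur) from by simp [pvGStep, hb, hc]]
        rw [ih gs cur]
        simp [pvPrep, hb, List.isEmpty_iff.mp hc]
      · rw [show pvGStep (gs, cur) l = (gs ++ [cur], []) from by simp [pvGStep, hb, hc]]
        rw [ih (gs ++ [cur]) []]
        simp [pvPrep, hb, hc]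
    · rw [show pvGStep (gs, cur) l = (gs, cur ++ [l]) from by simp [pvGStep, hb]]
      rw [ih gs (cur ++ [l])]
      simp [pvPrep, hb]

lemma pvPrep_spec (lines : List String) :
    pvPrep [] lines = pvGroupsRec lines ∧
    ∀ cur : List String, ¬ cur.isEmpty →
      pvPrep cur lines =
        (cur ++ lines.takeWhile (fun x => !pvBlank x)) ::
          pvGroupsRec (lines.dropWhile (fun x => !pvBlank x)) := by
  induction lines with
  | nil =>
    refine ⟨by simp [pvPrep, pvGroupsRec], ?_⟩
    intro cur hc
    simp [pvPrep, hc, pvGroupsRec]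
  | cons l ls ih =>
    by_cases hb : pvBlank l
    · refine ⟨?_, ?_⟩
      · simp [pvPrep, hb, pvGroupsRec, ih.1]
      · intro cur hc
        simp [pvPrep, hb, hc, pvGroupsRec, ih.1]
    · refine ⟨?_, ?_⟩
      · have := ih.2 [l] (by simp)
        simp only [pvPrep, hb]
        simp only [List.nil_append] at this ⊢
        rw [this]
        simp [pvGroupsRec, hb]
      · intro cur hc
        have := ih.2 (cur ++ [l]) (by simp)
        simp only [pvPrep, hb]
        rw [this]
        simp [hb]

-- a line starting with '>' is not blank
lemma pvHeader_not_blank (l : String) (h : PySem.Str.startswith l ">" = true) :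
    pvBlank l = false := by
  have hpre : (">").toList <+: l.toList := by
    have := (PySem.Chars.startswith_iff l.toList (">").toList).mp (by simpa using h)
    exact this
  obtain ⟨t, ht⟩ := hpre
  unfold pvBlank
  by_contra hb
  have hb' : (PySem.Str.strip l == "") = true := by
    cases h' : (PySem.Str.strip l == "") <;> simp_all
  have hnil : (PySem.Str.strip l).toList = [] := by
    have : PySem.Str.strip l = "" := by simpa using hb'
    simp [this]
  have hnil' : PySem.Chars.strip l.toList = [] := by
    simpa using hnil
  rw [← ht] at hnil'
  unfold PySem.Chars.strip PySem.Chars.lstrip PySem.Chars.rstrip at hnil'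
  have hgt : PySem.Chars.isspace '>' = false := by decide
  rw [show (">").toList ++ t = '>' :: t by rfl] at hnil'
  rw [List.dropWhile_cons_of_neg (by simp [hgt])] at hnil'
  have : ∀ x ∈ ('>' :: t).reverse, PySem.Chars.isspace x = true :=
    List.dropWhile_eq_nil_iff.mp (by simpa using hnil')
  exact absurd (this '>' (by simp)) (by simp [hgt])

-- A's three-conjunct header test equals B's two-conjunct one
lemma pvHeader_eq (l : String) : pvHeaderA l = pvHeaderB l := by
  unfold pvHeaderA pvHeaderB
  cases hs : PySem.Str.startswith l ">"
  · simp
  · have hin : PySem.Str.isIn ">" l = true := by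
      refine (PySem.Str.isIn_iff_infix _ _).mpr ?_
      have hpre : (">").toList <+: l.toList :=
        (PySem.Chars.startswith_iff l.toList (">").toList).mp (by simpa using hs)
      exact hpre.isInfix
    rw [hin]
    simp

lemma pvStepB_nil (d : PySem.Dict String String) : pvStepB d [] = d := rfl

lemma pvStepB_skip (d : PySem.Dict String String) (l : String) (g : List String)
    (h : pvHeaderB l = false) : pvStepB d (l :: g) = pvStepB d g := by
  unfold pvStepB
  rw [List.dropWhile_cons_of_pos (by simp [h])]

lemma pvMain : ∀ (n : Nat) (lines : List String), lines.length ≤ n → ∀ d,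
    pvLoopA lines d = (pvGroupsRec lines).foldl pvStepB d := by
  intro n
  induction n with
  | zero =>
    intro lines hl d
    have : lines = [] := List.eq_nil_of_length_eq_zero (Nat.le_zero.mp hl)
    simp [this, pvLoopA, pvGroupsRec]
  | succ n ih =>
    intro lines hl d
    match lines with
    | [] => simp [pvLoopA, pvGroupsRec]
    | l :: ls =>
      have hls : ls.length ≤ n := by simpa using hl
      by_cases hh : pvHeaderA l = true
      · have hnb : pvBlank l = false := by
          apply pvHeader_not_blank
          unfold pvHeaderA at hh
          exact (by simp_all : PySem.Str.startswith l ">" = true)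
        have hB : pvHeaderB l = true := by rw [← pvHeader_eq]; exact hh
        rw [pvLoopA, if_pos hh, pvGroupsRec, if_neg (by simp [hnb])]
        rw [ih _ (le_trans (List.length_dropWhile_le _ _) hls)]
        simp only [List.foldl_cons]
        congr 1
        unfold pvStepB
        rw [List.dropWhile_cons_of_neg (by simp [hB])]
      · rw [pvLoopA, if_neg hh, ih ls hls d]
        have hB : pvHeaderB l = false := by
          rw [← pvHeader_eq]; cases h' : pvHeaderA l; rfl; exact absurd h' hh
        by_cases hb : pvBlank l
        · rw [pvGroupsRec, if_pos hb]
        · rw [pvGroupsRec, if_neg (by simp [hb])]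
          match ls with
          | [] => simp [pvGroupsRec, pvStepB_skip _ _ _ hB, pvStepB_nil]
          | x :: xs =>
            by_cases hx : pvBlank x
            · simp only [List.takeWhile_cons, List.dropWhile_cons, hx, Bool.not_true,
                List.foldl_cons]
              simp [pvStepB_skip _ _ _ hB, pvStepB_nil]
            · simp only [List.takeWhile_cons, List.dropWhile_cons, hx]
              rw [pvGroupsRec, if_neg (by simp [hx])]
              simp only [List.foldl_cons]
              rw [pvStepB_skip _ _ _ hB]
              simp

-- ===== VERDICT (by name: the statement is the Claim_ definition above) =====
theorem parse_sdf_props_block_py_spec : Claim_equal_parse_sdf_props_block_py := by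
  intro block _
  unfold Spec_parse_sdf_props_block_py parse_sdf_props_block_py parse_sdf_props_block_py_alt
  rw [pvMain (PySem.Str.splitlines block).length _ le_rfl]
  rw [pvGStep_foldl (PySem.Str.splitlines block) [] []]
  rw [(pvPrep_spec (PySem.Str.splitlines block)).1]
  simp only [List.nil_append]
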